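-- pv_equiv track=rewrite | github.com/jvcmtr/MoserCircle | circleDivision.py | getExtraRegions
-- ===== SOURCE A (Python) =====
-- def getExtraRegions(nth_point):
--     """returns how many new regions are created when a new point is added"""
--     on_right = nth_point - 2
--     on_left = 0
--     extraRegions = 0
--
--     while(on_right >= 0):
--         extraRegions += drawLine(on_left, on_right)
--         on_left += 1
--         on_right -= 1
--     return extraRegions
--
-- def drawLine(left, right):
--     """returns how many new regions a line creates, given how many points there are to the left and to the right of the given line"""
--     return (left*right)+1
-- ===== SOURCE B (Python) =====
-- def getExtraRegions(nth_point):
--     """returns how many new regions are created when a new point is added"""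
--     if nth_point < 2:
--         return 0
--     m = nth_point - 2
--     # sum_{i=0}^{m} (i*(m-i) + 1) = (m+1) + (m-1)*m*(m+1)/6, computed in O(1)
--     return (m + 1) + (m - 1) * m * (m + 1) // 6
-- ===== Notes on version B (the rewrite author's own statement) =====
-- stated objective: faster
-- what changed: Replaced the O(n) while-loop summing drawLine(i, m-i) by the closed-form arithmetic sum (m+1) + (m-1)*m*(m+1)//6.
import Mathlib
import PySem

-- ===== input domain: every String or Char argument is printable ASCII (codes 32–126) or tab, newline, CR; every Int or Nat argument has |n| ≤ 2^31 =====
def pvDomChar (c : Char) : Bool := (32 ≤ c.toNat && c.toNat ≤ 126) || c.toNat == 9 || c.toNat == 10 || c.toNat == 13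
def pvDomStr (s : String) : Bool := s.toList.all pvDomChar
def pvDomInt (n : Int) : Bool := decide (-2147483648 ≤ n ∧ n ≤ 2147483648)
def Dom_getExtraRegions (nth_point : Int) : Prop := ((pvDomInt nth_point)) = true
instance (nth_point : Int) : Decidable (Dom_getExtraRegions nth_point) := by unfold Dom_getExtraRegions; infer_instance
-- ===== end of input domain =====

-- B replaces A's O(n) while-loop over drawLine by the closed-form sum (m+1) + (m-1)*m*(m+1)//6 (asymptotically faster).


-- ===== PORT A =====
def drawLine (left right : Int) : Int := left * right + 1

def getExtraRegionsLoop (on_left on_right extraRegions : Int) : Int :=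
  if on_right ≥ 0 then
    getExtraRegionsLoop (on_left + 1) (on_right - 1) (extraRegions + drawLine on_left on_right)
  else
    extraRegions
termination_by (on_right + 1).toNat
decreasing_by omega

def getExtraRegions (nth_point : Int) : Int :=
  getExtraRegionsLoop 0 (nth_point - 2) 0

-- ===== PORT B =====
def getExtraRegions_alt (nth_point : Int) : Int :=
  if nth_point < 2 then 0
  else
    let m := nth_point - 2
    (m + 1) + PySem.Int.floordiv ((m - 1) * m * (m + 1)) 6

-- ===== PRECONDITION & SPEC =====
def Spec_getExtraRegions (nth_point : Int) (out : Int) : Prop := out = getExtraRegions_alt nth_point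
instance (nth_point : Int) (out : Int) : Decidable (Spec_getExtraRegions nth_point out) := by unfold Spec_getExtraRegions; infer_instance

-- ===== CLAIM (what is proved, stated in full; the proofs are below) =====
def Claim_equal_getExtraRegions : Prop := ∀ (nth_point : Int), Dom_getExtraRegions nth_point → Spec_getExtraRegions nth_point (getExtraRegions nth_point)

-- ===== LEMMAS AND PROOFS =====

-- Loop invariant: for r = (n : Int) - 1 (so r ≥ -1), six times the loop's result has a polynomial closed form.
theorem getExtraRegionsLoop_closed (n : Nat) : ∀ (l e : Int),
    6 * getExtraRegionsLoop l ((n : Int) - 1) e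
      = 6 * e + 6 * (n : Int) + 3 * l * ((n : Int) - 1) * (n : Int)
        + ((n : Int) - 2) * ((n : Int) - 1) * (n : Int) := by
  induction n with
  | zero =>
      intro l e
      rw [getExtraRegionsLoop]
      norm_num
  | succ k ih =>
      intro l e
      rw [getExtraRegionsLoop]
      have hr : ((k + 1 : Nat) : Int) - 1 ≥ 0 := by push_cast; omega
      rw [if_pos hr]
      have harg : ((k + 1 : Nat) : Int) - 1 - 1 = (k : Int) - 1 := by push_cast; ring
      rw [harg, ih]
      push_cast
      unfold drawLine
      ring

theorem loop_neg (l r e : Int) (h : ¬ r ≥ 0) : getExtraRegionsLoop l r e = e := by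
  rw [getExtraRegionsLoop, if_neg h]

-- ===== VERDICT (by name: the statement is the Claim_ definition above) =====
theorem getExtraRegions_spec : Claim_equal_getExtraRegions := by
  intro n _
  unfold Spec_getExtraRegions getExtraRegions getExtraRegions_alt
  by_cases h : n < 2
  · rw [if_pos h, loop_neg _ _ _ (by omega)]
  · rw [if_neg h]
    set m : Int := n - 2 with hm
    have hm0 : 0 ≤ m := by omega
    have hn : m + 1 = ((m + 1).toNat : Int) := by omega
    have h6 : 6 * getExtraRegionsLoop 0 m 0
        = 6 * (m + 1) + (m - 1) * m * (m + 1) := by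
      have := getExtraRegionsLoop_closed (m + 1).toNat 0 0
      rw [← hn] at this
      have harg : m + 1 - 1 = m := by ring
      rw [harg] at this
      linarith [this]
    have hdvd : (m - 1) * m * (m + 1) = 6 * (getExtraRegionsLoop 0 m 0 - (m + 1)) := by
      linarith
    show getExtraRegionsLoop 0 m 0 = m + 1 + PySem.Int.floordiv ((m - 1) * m * (m + 1)) 6
    rw [show PySem.Int.floordiv ((m - 1) * m * (m + 1)) 6
          = (getExtraRegionsLoop 0 m 0 - (m + 1)) from by
      rw [hdvd]
      simp [PySem.Int.floordiv, Int.mul_fdiv_cancel_left _ (by norm_num : (6:Int) ≠ 0)]]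
    ring
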